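-- pv_equiv track=rewrite | github.com/furgy/mortgage-data-extractor | map_pb_to_stessa.py | map_transaction
-- ===== SOURCE A (Python) =====
-- def map_transaction(gl_account, memo):
--     gl_account = gl_account.lower()
--     memo = memo.lower()
--
--     # Income
--     if "rent income" in gl_account:
--         return "Rents"
--     if "late fee" in gl_account:
--         return "Late Fees"
--     if "utility reimbursement" in gl_account:
--         return "Tenant Pass-Throughs"
--     if "eviction fee reimbursement" in gl_account:
--         return "Eviction Fees"
--
--     # Management
--     if "management fees" in gl_account:
--         return "Property Management"
--     if "leasing fee" in gl_account or "lease renewal fee" in gl_account: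
--         return "Leasing Commissions"
--
--     # Expenses
--     if "labor costs" in gl_account:
--         return "Labor"
--     if "cleaning and maintenance" in gl_account:
--         return "Cleaning & Janitorial"
--     if "legal and professional fees" in gl_account:
--         return "Legal"
--     if "material" in gl_account:
--         if any(kw in memo for kw in ["plumb", "faucet", "bath", "drain", "sink", "toilet"]):
--             return "Plumbing Repairs"
--         if "roof" in memo:
--             return "Roof Repairs"
--         if any(kw in memo for kw in ["lawn", "garden", "tree", "grass", "yard"]):
--             return "Gardening & Landscaping"
--         if any(kw in memo for kw in ["lock", "key", "door", "screen"]):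
--             return "Security, Locks & Keys"
--         if any(kw in memo for kw in ["paint", "supplies", "moulding", "outlet", "plate", "batteries", "light", "filter", "gloves", "nails"]):
--             return "Labor"
--         return "UNCLEAR"
--
--     if "utilities" in gl_account:
--         if any(kw in memo for kw in ["water", "sewer", "gsd", "sanitary", "mcd"]):
--             return "Water & Sewer"
--         if any(kw in memo for kw in ["electric", "firstenergy", "light"]):
--             return "Electric"
--         if "gas" in memo:
--             return "Gas"
--         if "nipsco" in memo:
--             return "Gas & Electric"
--         return "Water & Sewer" # Common default for non-specified utility bills
--
--     if "rental registration" in gl_account or "admin fee rental registration" in gl_account: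
--         return "R&M Permits & Inspections"
--
--     # Transfers / Equity
--     if "owner contribution" in gl_account:
--         return "Owner Contributions"
--     if "owner draw" in gl_account:
--         return "Owner Distributions"
--
--     # Liabilities
--     if "security deposit liability" in gl_account:
--         return "Security Deposits"
--     if "prepayments" in gl_account:
--         return "UNCLEAR"
--
--     return "UNCLEAR"
-- ===== SOURCE B (Python) =====
-- # One flat decision table (gl substring, memo substring, category) folded in
-- # reverse priority order with an overwrite accumulator instead of an if-cascade.
--
-- # Flat rows in priority order; "" means "no memo condition" ("" in s is always
-- # True).  Nested memo checks are flattened: each keyword is its own row, and a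
-- # branch default is a row with memo pattern "" right after its keyword rows.
-- _RULES = [
--     ("rent income", "", "Rents"),
--     ("late fee", "", "Late Fees"),
--     ("utility reimbursement", "", "Tenant Pass-Throughs"),
--     ("eviction fee reimbursement", "", "Eviction Fees"),
--     ("management fees", "", "Property Management"),
--     ("leasing fee", "", "Leasing Commissions"),
--     ("lease renewal fee", "", "Leasing Commissions"),
--     ("labor costs", "", "Labor"),
--     ("cleaning and maintenance", "", "Cleaning & Janitorial"),
--     ("legal and professional fees", "", "Legal"),
--     ("material", "plumb", "Plumbing Repairs"),
--     ("material", "faucet", "Plumbing Repairs"),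
--     ("material", "bath", "Plumbing Repairs"),
--     ("material", "drain", "Plumbing Repairs"),
--     ("material", "sink", "Plumbing Repairs"),
--     ("material", "toilet", "Plumbing Repairs"),
--     ("material", "roof", "Roof Repairs"),
--     ("material", "lawn", "Gardening & Landscaping"),
--     ("material", "garden", "Gardening & Landscaping"),
--     ("material", "tree", "Gardening & Landscaping"),
--     ("material", "grass", "Gardening & Landscaping"),
--     ("material", "yard", "Gardening & Landscaping"),
--     ("material", "lock", "Security, Locks & Keys"),
--     ("material", "key", "Security, Locks & Keys"),
--     ("material", "door", "Security, Locks & Keys"),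
--     ("material", "screen", "Security, Locks & Keys"),
--     ("material", "paint", "Labor"),
--     ("material", "supplies", "Labor"),
--     ("material", "moulding", "Labor"),
--     ("material", "outlet", "Labor"),
--     ("material", "plate", "Labor"),
--     ("material", "batteries", "Labor"),
--     ("material", "light", "Labor"),
--     ("material", "filter", "Labor"),
--     ("material", "gloves", "Labor"),
--     ("material", "nails", "Labor"),
--     ("material", "", "UNCLEAR"),
--     ("utilities", "water", "Water & Sewer"),
--     ("utilities", "sewer", "Water & Sewer"),
--     ("utilities", "gsd", "Water & Sewer"),
--     ("utilities", "sanitary", "Water & Sewer"),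
--     ("utilities", "mcd", "Water & Sewer"),
--     ("utilities", "electric", "Electric"),
--     ("utilities", "firstenergy", "Electric"),
--     ("utilities", "light", "Electric"),
--     ("utilities", "gas", "Gas"),
--     ("utilities", "nipsco", "Gas & Electric"),
--     ("utilities", "", "Water & Sewer"),
--     ("rental registration", "", "R&M Permits & Inspections"),
--     ("admin fee rental registration", "", "R&M Permits & Inspections"),
--     ("owner contribution", "", "Owner Contributions"),
--     ("owner draw", "", "Owner Distributions"),
--     ("security deposit liability", "", "Security Deposits"),
--     ("prepayments", "", "UNCLEAR"),
-- ]
--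
--
-- def map_transaction(gl_account, memo):
--     gl = gl_account.lower()
--     m = memo.lower()
--     # fold the table back-to-front: a later overwrite = a higher-priority row,
--     # so the final value is the first matching row of the priority order
--     cat = "UNCLEAR"
--     for g, k, c in reversed(_RULES):
--         if g in gl and k in m:
--             cat = c
--     return cat
-- ===== Notes on version B (the rewrite author's own statement) =====
-- stated objective: alternative
-- what changed: Flattened the two-level if-cascade into one flat decision table of (gl substring, memo substring, category) rows and replaced first-match early return by a reverse-order fold with an overwrite accumulator (no short-circuit), so the final overwrite is the highest-priority matching row.
import Mathlib
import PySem

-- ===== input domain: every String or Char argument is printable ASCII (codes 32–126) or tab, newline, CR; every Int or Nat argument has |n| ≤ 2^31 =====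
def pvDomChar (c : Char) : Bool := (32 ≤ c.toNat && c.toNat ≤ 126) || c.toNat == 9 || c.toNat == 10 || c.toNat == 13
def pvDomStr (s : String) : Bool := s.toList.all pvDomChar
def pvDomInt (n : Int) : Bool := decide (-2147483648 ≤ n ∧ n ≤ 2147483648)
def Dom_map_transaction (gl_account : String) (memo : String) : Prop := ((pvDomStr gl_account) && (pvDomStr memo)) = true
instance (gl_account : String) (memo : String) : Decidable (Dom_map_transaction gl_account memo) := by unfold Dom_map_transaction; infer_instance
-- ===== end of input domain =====

-- B flattens A's two-level if-cascade into one flat (gl,memo,category) decision table folded in reverse priority order with an overwrite accumulator; alternative structure, same cost.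


-- ===== PORT A =====
def map_transaction (gl_account : String) (memo : String) : String :=
  let gl := PySem.Str.lower gl_account
  let memo := PySem.Str.lower memo
  if PySem.Str.isIn "rent income" gl then "Rents"
  else if PySem.Str.isIn "late fee" gl then "Late Fees"
  else if PySem.Str.isIn "utility reimbursement" gl then "Tenant Pass-Throughs"
  else if PySem.Str.isIn "eviction fee reimbursement" gl then "Eviction Fees"
  else if PySem.Str.isIn "management fees" gl then "Property Management"
  else if PySem.Str.isIn "leasing fee" gl || PySem.Str.isIn "lease renewal fee" gl then "Leasing Commissions"
  else if PySem.Str.isIn "labor costs" gl then "Labor"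
  else if PySem.Str.isIn "cleaning and maintenance" gl then "Cleaning & Janitorial"
  else if PySem.Str.isIn "legal and professional fees" gl then "Legal"
  else if PySem.Str.isIn "material" gl then
    if (["plumb", "faucet", "bath", "drain", "sink", "toilet"]).any (fun kw => PySem.Str.isIn kw memo) then "Plumbing Repairs"
    else if PySem.Str.isIn "roof" memo then "Roof Repairs"
    else if (["lawn", "garden", "tree", "grass", "yard"]).any (fun kw => PySem.Str.isIn kw memo) then "Gardening & Landscaping"
    else if (["lock", "key", "door", "screen"]).any (fun kw => PySem.Str.isIn kw memo) then "Security, Locks & Keys"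
    else if (["paint", "supplies", "moulding", "outlet", "plate", "batteries", "light", "filter", "gloves", "nails"]).any (fun kw => PySem.Str.isIn kw memo) then "Labor"
    else "UNCLEAR"
  else if PySem.Str.isIn "utilities" gl then
    if (["water", "sewer", "gsd", "sanitary", "mcd"]).any (fun kw => PySem.Str.isIn kw memo) then "Water & Sewer"
    else if (["electric", "firstenergy", "light"]).any (fun kw => PySem.Str.isIn kw memo) then "Electric"
    else if PySem.Str.isIn "gas" memo then "Gas"
    else if PySem.Str.isIn "nipsco" memo then "Gas & Electric"
    else "Water & Sewer"
  else if PySem.Str.isIn "rental registration" gl || PySem.Str.isIn "admin fee rental registration" gl then "R&M Permits & Inspections"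
  else if PySem.Str.isIn "owner contribution" gl then "Owner Contributions"
  else if PySem.Str.isIn "owner draw" gl then "Owner Distributions"
  else if PySem.Str.isIn "security deposit liability" gl then "Security Deposits"
  else if PySem.Str.isIn "prepayments" gl then "UNCLEAR"
  else "UNCLEAR"

-- ===== PORT B =====
-- flat decision table: (gl substring, memo substring, category); "" = no memo condition
def pvRules : List (String × String × String) :=
  [ ("rent income", "", "Rents"),
    ("late fee", "", "Late Fees"),
    ("utility reimbursement", "", "Tenant Pass-Throughs"),
    ("eviction fee reimbursement", "", "Eviction Fees"),
    ("management fees", "", "Property Management"),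
    ("leasing fee", "", "Leasing Commissions"),
    ("lease renewal fee", "", "Leasing Commissions"),
    ("labor costs", "", "Labor"),
    ("cleaning and maintenance", "", "Cleaning & Janitorial"),
    ("legal and professional fees", "", "Legal"),
    ("material", "plumb", "Plumbing Repairs"),
    ("material", "faucet", "Plumbing Repairs"),
    ("material", "bath", "Plumbing Repairs"),
    ("material", "drain", "Plumbing Repairs"),
    ("material", "sink", "Plumbing Repairs"),
    ("material", "toilet", "Plumbing Repairs"),
    ("material", "roof", "Roof Repairs"),
    ("material", "lawn", "Gardening & Landscaping"),
    ("material", "garden", "Gardening & Landscaping"),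
    ("material", "tree", "Gardening & Landscaping"),
    ("material", "grass", "Gardening & Landscaping"),
    ("material", "yard", "Gardening & Landscaping"),
    ("material", "lock", "Security, Locks & Keys"),
    ("material", "key", "Security, Locks & Keys"),
    ("material", "door", "Security, Locks & Keys"),
    ("material", "screen", "Security, Locks & Keys"),
    ("material", "paint", "Labor"),
    ("material", "supplies", "Labor"),
    ("material", "moulding", "Labor"),
    ("material", "outlet", "Labor"),
    ("material", "plate", "Labor"),
    ("material", "batteries", "Labor"),
    ("material", "light", "Labor"),
    ("material", "filter", "Labor"),
    ("material", "gloves", "Labor"),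
    ("material", "nails", "Labor"),
    ("material", "", "UNCLEAR"),
    ("utilities", "water", "Water & Sewer"),
    ("utilities", "sewer", "Water & Sewer"),
    ("utilities", "gsd", "Water & Sewer"),
    ("utilities", "sanitary", "Water & Sewer"),
    ("utilities", "mcd", "Water & Sewer"),
    ("utilities", "electric", "Electric"),
    ("utilities", "firstenergy", "Electric"),
    ("utilities", "light", "Electric"),
    ("utilities", "gas", "Gas"),
    ("utilities", "nipsco", "Gas & Electric"),
    ("utilities", "", "Water & Sewer"),
    ("rental registration", "", "R&M Permits & Inspections"),
    ("admin fee rental registration", "", "R&M Permits & Inspections"),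
    ("owner contribution", "", "Owner Contributions"),
    ("owner draw", "", "Owner Distributions"),
    ("security deposit liability", "", "Security Deposits"),
    ("prepayments", "", "UNCLEAR") ]

-- reverse-order fold: a later overwrite is a higher-priority row
def map_transaction_alt (gl_account : String) (memo : String) : String :=
  let gl := PySem.Str.lower gl_account
  let m := PySem.Str.lower memo
  (pvRules.reverse).foldl
    (fun cat r => if PySem.Str.isIn r.1 gl && PySem.Str.isIn r.2.1 m then r.2.2 else cat)
    "UNCLEAR"

-- ===== PRECONDITION & SPEC =====
def Spec_map_transaction (gl_account : String) (memo : String) (out : String) : Prop := out = map_transaction_alt gl_account memo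
instance (gl_account : String) (memo : String) (out : String) : Decidable (Spec_map_transaction gl_account memo out) := by unfold Spec_map_transaction; infer_instance

-- ===== CLAIM =====
def Claim_equal_map_transaction : Prop := ∀ (gl_account : String) (memo : String), Dom_map_transaction gl_account memo → Spec_map_transaction gl_account memo (map_transaction gl_account memo)

-- ===== LEMMAS AND PROOFS =====

-- first-match reading of the reverse fold: the last overwrite is the first matching row
def pvFirstMatch (gl m : String) : List (String × String × String) → String
  | [] => "UNCLEAR"
  | r :: rest => if PySem.Str.isIn r.1 gl && PySem.Str.isIn r.2.1 m then r.2.2 else pvFirstMatch gl m rest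

theorem pvFold_reverse_eq_firstMatch (gl m : String) (l : List (String × String × String)) :
    (l.reverse).foldl
      (fun cat r => if PySem.Str.isIn r.1 gl && PySem.Str.isIn r.2.1 m then r.2.2 else cat)
      "UNCLEAR" = pvFirstMatch gl m l := by
  induction l with
  | nil => rfl
  | cons r rest ih =>
    simp only [List.reverse_cons, List.foldl_append, List.foldl_cons, List.foldl_nil, ih,
      pvFirstMatch]

theorem pv_isIn_empty (s : String) : PySem.Str.isIn "" s = true := by
  simp [PySem.Str.isIn, PySem.Chars.isIn_nil]

-- merge two consecutive ifs with the same result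
theorem pv_if_if_same {α : Type} (a b : Bool) (c x : α) :
    (if a then c else if b then c else x) = (if (a || b) then c else x) := by
  cases a <;> simp

-- ===== VERDICT =====
theorem map_transaction_spec : Claim_equal_map_transaction := by
  intro gl_account memo _
  unfold Spec_map_transaction map_transaction map_transaction_alt
  rw [pvFold_reverse_eq_firstMatch]
  simp only [pvRules, pvFirstMatch, pv_isIn_empty, Bool.and_true, List.any_cons, List.any_nil,
    Bool.or_false]
  set gl := PySem.Str.lower gl_account
  set m := PySem.Str.lower memo
  cases h1 : PySem.Str.isIn "rent income" gl <;> simp only [h1, Bool.false_eq_true, Bool.true_or, Bool.false_or, Bool.or_false, Bool.true_and, Bool.false_and, Bool.and_true, eq_self_iff_true, if_true, if_false]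
  cases h2 : PySem.Str.isIn "late fee" gl <;> simp only [h2, Bool.false_eq_true, Bool.true_or, Bool.false_or, Bool.or_false, Bool.true_and, Bool.false_and, Bool.and_true, eq_self_iff_true, if_true, if_false]
  cases h3 : PySem.Str.isIn "utility reimbursement" gl <;> simp only [h3, Bool.false_eq_true, Bool.true_or, Bool.false_or, Bool.or_false, Bool.true_and, Bool.false_and, Bool.and_true, eq_self_iff_true, if_true, if_false]
  cases h4 : PySem.Str.isIn "eviction fee reimbursement" gl <;> simp only [h4, Bool.false_eq_true, Bool.true_or, Bool.false_or, Bool.or_false, Bool.true_and, Bool.false_and, Bool.and_true, eq_self_iff_true, if_true, if_false]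
  cases h5 : PySem.Str.isIn "management fees" gl <;> simp only [h5, Bool.false_eq_true, Bool.true_or, Bool.false_or, Bool.or_false, Bool.true_and, Bool.false_and, Bool.and_true, eq_self_iff_true, if_true, if_false]
  cases h6a : PySem.Str.isIn "leasing fee" gl <;>
    cases h6b : PySem.Str.isIn "lease renewal fee" gl <;>
    simp only [h6a, h6b, Bool.false_eq_true, Bool.true_or, Bool.false_or, Bool.or_false, Bool.true_and, Bool.false_and, Bool.and_true, eq_self_iff_true, if_true, if_false]
  all_goals (
    cases h7 : PySem.Str.isIn "labor costs" gl <;> simp only [h7, Bool.false_eq_true, Bool.true_or, Bool.false_or, Bool.or_false, Bool.true_and, Bool.false_and, Bool.and_true, eq_self_iff_true, if_true, if_false]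
    cases h8 : PySem.Str.isIn "cleaning and maintenance" gl <;> simp only [h8, Bool.false_eq_true, Bool.true_or, Bool.false_or, Bool.or_false, Bool.true_and, Bool.false_and, Bool.and_true, eq_self_iff_true, if_true, if_false]
    cases h9 : PySem.Str.isIn "legal and professional fees" gl <;> simp only [h9, Bool.false_eq_true, Bool.true_or, Bool.false_or, Bool.or_false, Bool.true_and, Bool.false_and, Bool.and_true, eq_self_iff_true, if_true, if_false]
    cases h10 : PySem.Str.isIn "material" gl <;> simp only [h10, Bool.false_eq_true, Bool.true_or, Bool.false_or, Bool.or_false, Bool.true_and, Bool.false_and, Bool.and_true, eq_self_iff_true, if_true, if_false]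
    case true => simp only [pv_if_if_same, Bool.or_assoc]
    case false =>
      cases h11 : PySem.Str.isIn "utilities" gl <;> simp only [h11, Bool.false_eq_true, Bool.true_or, Bool.false_or, Bool.or_false, Bool.true_and, Bool.false_and, Bool.and_true, eq_self_iff_true, if_true, if_false]
      case true => simp only [pv_if_if_same, Bool.or_assoc]
      case false =>
        cases h12a : PySem.Str.isIn "rental registration" gl <;>
          cases h12b : PySem.Str.isIn "admin fee rental registration" gl <;>
          simp only [h12a, h12b, Bool.false_eq_true, Bool.true_or, Bool.false_or, Bool.or_false, Bool.true_and, Bool.false_and, Bool.and_true, eq_self_iff_true, if_true, if_false])
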